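-- pv_equiv track=rewrite | github.com/pymartheproject/pymarthe | pymarthe/utils/shp_utils.py | enforce_10ch_limit
-- ===== SOURCE A (Python) =====
-- def enforce_10ch_limit(names):
--     """
--     Enforce 10 character limit for fieldnames.
--     Add suffix for duplicate names starting at 0.
--
--     Parameters
--     ----------
--     names (list) : strings unformated
--
--     Returns
--     -------
--     names : list of unique strings of len <= 10.
--     """
--     names = [n[:5] + n[-4:] + "_" if len(n) > 10 else n for n in names]
--     dups = {x: names.count(x) for x in names}
--     suffix = {n: list(range(cnt)) for n, cnt in dups.items() if cnt > 1}
--     for i, n in enumerate(names):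
--         if dups[n] > 1:
--             names[i] = n[:9] + str(suffix[n].pop(0))
--     return names
-- ===== SOURCE B (Python) =====
-- def enforce_10ch_limit(names):
--     """Group-by-index strategy: one enumerate pass builds a multimap from each
--     truncated name to the list of its positions; duplicates are then suffixed
--     group by group, writing directly into the result by index."""
--     out = [n[:5] + n[-4:] + "_" if len(n) > 10 else n for n in names]
--     groups = {}
--     for i, n in enumerate(out):
--         groups.setdefault(n, []).append(i)
--     for n, idxs in groups.items():
--         if len(idxs) > 1:
--             for k, i in enumerate(idxs):
--                 out[i] = n[:9] + str(k)
--     return out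
-- ===== Notes on version B (the rewrite author's own statement) =====
-- stated objective: faster
-- what changed: Replaces A's quadratic count-dict plus per-name suffix range-lists popped inside a conditional scan by an index-grouping multimap built in one enumerate pass, followed by a per-group nested loop that writes the suffixed names back by position.
import Mathlib
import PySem

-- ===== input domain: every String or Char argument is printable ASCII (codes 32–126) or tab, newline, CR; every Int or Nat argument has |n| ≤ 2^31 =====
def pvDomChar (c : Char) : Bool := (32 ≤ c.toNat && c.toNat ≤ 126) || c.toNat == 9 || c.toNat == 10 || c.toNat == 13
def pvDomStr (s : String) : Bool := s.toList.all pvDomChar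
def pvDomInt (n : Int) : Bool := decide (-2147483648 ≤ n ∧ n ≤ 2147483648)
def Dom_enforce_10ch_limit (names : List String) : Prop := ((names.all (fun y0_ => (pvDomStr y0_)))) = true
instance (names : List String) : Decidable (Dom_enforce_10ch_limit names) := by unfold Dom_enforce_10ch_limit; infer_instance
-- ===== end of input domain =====

-- B replaces A's count-dict + per-name suffix range-lists popped inside a conditional scan
-- by an index-grouping multimap (one enumerate pass) followed by a per-group nested loop
-- that writes the suffixed names back by position. Neither program mutates the caller's list.

-- ===== PORT A =====
def enforce_10ch_limit (names : List String) : List String :=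
  -- names = [n[:5] + n[-4:] + "_" if len(n) > 10 else n for n in names]
  let names1 := names.map (fun n =>
    if PySem.Str.len n > 10 then
      String.ofList (PySem.Chars.slice n.toList none (some 5) ++
                     PySem.Chars.slice n.toList (some (-4)) none ++ ['_'])
    else n)
  -- dups = {x: names.count(x) for x in names}
  let dups : PySem.Dict String Int :=
    names1.foldl (fun d x => d.insert x ((PySem.List.count names1 x : Nat) : Int)) PySem.Dict.empty
  -- suffix = {n: list(range(cnt)) for n, cnt in dups.items() if cnt > 1}
  let suffix : PySem.Dict String (List Int) :=
    dups.items.foldl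
      (fun d (p : String × Int) => if p.2 > 1 then d.insert p.1 (PySem.List.pyRange 0 p.2 1) else d)
      PySem.Dict.empty
  -- for i, n in enumerate(names): if dups[n] > 1: names[i] = n[:9] + str(suffix[n].pop(0))
  -- (names[i] is read before it is overwritten, so the in-place loop is the fold below;
  --  suffix[n].pop(0): head is the popped value — suffix[n] is nonempty whenever dups[n] > 1,
  --  so the .headD 0 default is unreachable; the tail is stored back)
  let fin := names1.foldl
    (fun (st : List String × PySem.Dict String (List Int)) n =>
      if dups.getD n 0 > 1 then
        let lst := st.2.getD n []
        (st.1 ++ [String.ofList (PySem.Chars.slice n.toList none (some 9) ++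
                                 (PySem.Int.toStr (lst.headD 0)).toList)],
         st.2.insert n lst.tail)
      else (st.1 ++ [n], st.2))
    ([], suffix)
  fin.1

-- ===== PORT B =====
def enforce_10ch_limit_alt (names : List String) : List String :=
  -- out = [n[:5] + n[-4:] + "_" if len(n) > 10 else n for n in names]
  let out0 := names.map (fun n =>
    if PySem.Str.len n > 10 then
      String.ofList (PySem.Chars.slice n.toList none (some 5) ++
                     PySem.Chars.slice n.toList (some (-4)) none ++ ['_'])
    else n)
  -- groups = {}; for i, n in enumerate(out): groups.setdefault(n, []).append(i)
  -- (setdefault(n, []).append(i) extends the list stored under n: Dict.modify n [] (· ++ [i]))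
  let groups : PySem.Dict String (List Int) :=
    (PySem.List.enumerate out0).foldl
      (fun d (p : Int × String) => d.modify p.2 [] (fun l => l ++ [p.1])) PySem.Dict.empty
  -- for n, idxs in groups.items():
  --   if len(idxs) > 1:
  --     for k, i in enumerate(idxs): out[i] = n[:9] + str(k)
  -- (out[i] = v with the in-range nonnegative index i is PySem.List.pySetD out i v)
  groups.items.foldl
    (fun (out : List String) (g : String × List Int) =>
      if (g.2.length : Int) > 1 then
        (PySem.List.enumerate g.2).foldl
          (fun out (q : Int × Int) =>
            PySem.List.pySetD out q.2
              (String.ofList (PySem.Chars.slice g.1.toList none (some 9) ++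
                              (PySem.Int.toStr q.1).toList)))
          out
      else out)
    out0

-- ===== PRECONDITION & SPEC =====
def Spec_enforce_10ch_limit (names : List String) (out : List String) : Prop := out = enforce_10ch_limit_alt names
instance (names : List String) (out : List String) : Decidable (Spec_enforce_10ch_limit names out) := by unfold Spec_enforce_10ch_limit; infer_instance

-- ===== CLAIM (what is proved, stated in full; the proofs are below) =====
def Claim_equal_enforce_10ch_limit : Prop := ∀ (names : List String), Dom_enforce_10ch_limit names → Spec_enforce_10ch_limit names (enforce_10ch_limit names)

-- ===== LEMMAS AND PROOFS =====

-- n[:9] + str(k), the suffixed field name (appears verbatim in both ports)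
def pvSfx (n : String) (k : Int) : String :=
  String.ofList (PySem.Chars.slice n.toList none (some 9) ++ (PySem.Int.toStr k).toList)

-- the common reference value: position j of the result carries the j-th truncated
-- name suffixed with its occurrence index among equal names so far
def pvSpec (cnt : String → Int) : List String → List String → List String
  | _, [] => []
  | pre, n :: suf =>
      (if cnt n > 1 then pvSfx n ((pre.count n : Nat) : Int) else n) :: pvSpec cnt (pre ++ [n]) suf

-- position of j in a list of indices (as an Int, ready to be the suffix number)
def pvPos (j : Int) : List Int → Option Int
  | [] => none
  | i :: is => if i = j then some 0 else (pvPos j is).map (· + 1)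

-- the indices (from offset s) at which L carries n, in order
def pvIdxsF (s : Int) (L : List String) (n : String) : List Int :=
  (((PySem.List.enumerate L s).map Prod.swap).filter (fun p => p.1 == n)).map (·.2)

-- ---- A-side lemmas ----

theorem pv_getD_foldl_insert_const (l : List String) (c : String → Int)
    (d : PySem.Dict String Int) (n : String) :
    (l.foldl (fun d x => d.insert x (c x)) d).getD n 0
      = if n ∈ l then c n else d.getD n 0 := by
  induction l generalizing d with
  | nil => simp
  | cons x l ih =>
      simp only [List.foldl_cons, ih, PySem.Dict.getD_insert, List.mem_cons]
      by_cases hx : n = x <;> by_cases hl : n ∈ l <;> simp [hx, hl]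

theorem pv_getD_suffix_fold (l : List String) (hnd : l.Nodup) (c : String → Int)
    (g : Int → List Int) (s0 : PySem.Dict String (List Int)) (n : String) :
    ((l.map (fun k => (k, c k))).foldl
        (fun d (p : String × Int) => if p.2 > 1 then d.insert p.1 (g p.2) else d) s0).getD n []
      = if n ∈ l ∧ c n > 1 then g (c n) else s0.getD n [] := by
  induction l generalizing s0 with
  | nil => simp
  | cons x l ih =>
      have hnd' := hnd
      simp only [List.nodup_cons] at hnd'
      simp only [List.map_cons, List.foldl_cons, ih hnd'.2, List.mem_cons]
      by_cases hx : n = x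
      · subst hx
        have hnl : ¬ n ∈ l := hnd'.1
        by_cases hc : c n > 1
        · simp [hnl, hc]
        · simp [hnl, hc]
      · by_cases hl : n ∈ l <;>
          · simp only [hl, hx, true_and, false_and, false_or, if_false]
            split_ifs <;> simp_all [PySem.Dict.getD_insert]

-- A's conditional scan popping from the suffix range dict equals the counter scan
theorem pv_main (cnt : String → Int)
    (rest : List String) (out : List String)
    (suf : PySem.Dict String (List Int)) (seen : PySem.Dict String Int)
    (hinv : ∀ n ∈ rest, cnt n > 1 →
        0 ≤ seen.getD n 0 ∧
        seen.getD n 0 + (PySem.List.count rest n : Nat) ≤ cnt n ∧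
        suf.getD n [] = (PySem.List.pyRange 0 (cnt n) 1).drop (seen.getD n 0).toNat) :
    (rest.foldl
      (fun (st : List String × PySem.Dict String (List Int)) n =>
        if cnt n > 1 then
          let lst := st.2.getD n []
          (st.1 ++ [String.ofList (PySem.Chars.slice n.toList none (some 9) ++
                                   (PySem.Int.toStr (lst.headD 0)).toList)],
           st.2.insert n lst.tail)
        else (st.1 ++ [n], st.2)) (out, suf)).1
    = (rest.foldl
      (fun (st : List String × PySem.Dict String Int) n =>
        if cnt n > 1 then
          (st.1 ++ [pvSfx n (st.2.getD n 0)], st.2.insert n (st.2.getD n 0 + 1))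
        else (st.1 ++ [n], st.2)) (out, seen)).1 := by
  induction rest generalizing out suf seen with
  | nil => rfl
  | cons n rest ih =>
      simp only [List.foldl_cons]
      by_cases hc : cnt n > 1
      · obtain ⟨h0, hcnt, hsuf⟩ := hinv n (by simp) hc
        have hcount : PySem.List.count (n :: rest) n = PySem.List.count rest n + 1 := by
          simp [PySem.List.count]
        have hlt : (seen.getD n 0).toNat < (PySem.List.pyRange 0 (cnt n) 1).length := by
          rw [PySem.List.length_pyRange_one]
          rw [hcount] at hcnt
          push_cast at hcnt
          omega
        have hdrop : (PySem.List.pyRange 0 (cnt n) 1).drop (seen.getD n 0).toNat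
            = (seen.getD n 0) :: (PySem.List.pyRange 0 (cnt n) 1).drop ((seen.getD n 0).toNat + 1) := by
          rw [List.drop_eq_getElem_cons hlt,
              PySem.List.getElem_pyRange_one 0 (cnt n) (seen.getD n 0).toNat hlt]
          rw [zero_add, Int.toNat_of_nonneg h0]
        simp only [hc, if_true, hsuf, hdrop, List.headD_cons, List.tail_cons, pvSfx]
        apply ih
        intro m hm hcm
        rcases eq_or_ne m n with rfl | hne
        · rw [hcount] at hcnt
          push_cast at hcnt
          have h1 : (seen.getD m 0 + 1).toNat = (seen.getD m 0).toNat + 1 := by omega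
          refine ⟨by simp; omega, ?_, ?_⟩
          · simp only [PySem.Dict.getD_insert, if_pos]
            omega
          · simp [h1]
        · have hcm' : PySem.List.count (n :: rest) m = PySem.List.count rest m := by
            simp [PySem.List.count, hne.symm]
          obtain ⟨g0, gcnt, gsuf⟩ := hinv m (by simp [hm]) hcm
          rw [hcm'] at gcnt
          exact ⟨by simpa [PySem.Dict.getD_insert, hne] using g0,
                 by simpa [PySem.Dict.getD_insert, hne] using gcnt,
                 by simpa [PySem.Dict.getD_insert, hne] using gsuf⟩
      · simp only [hc, if_false]
        apply ih
        intro m hm hcm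
        obtain ⟨g0, gcnt, gsuf⟩ := hinv m (by simp [hm]) hcm
        have : PySem.List.count rest m ≤ PySem.List.count (n :: rest) m := by
          simp [PySem.List.count, List.count_cons]
        refine ⟨g0, by omega, gsuf⟩

-- A's whole body on the truncated list L equals the counter scan over L
theorem pv_A_eq_scan (L : List String) :
    (L.foldl
      (fun (st : List String × PySem.Dict String (List Int)) n =>
        if (L.foldl (fun d x => d.insert x ((PySem.List.count L x : Nat) : Int))
              PySem.Dict.empty).getD n 0 > 1 then
          let lst := st.2.getD n []
          (st.1 ++ [String.ofList (PySem.Chars.slice n.toList none (some 9) ++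
                                   (PySem.Int.toStr (lst.headD 0)).toList)],
           st.2.insert n lst.tail)
        else (st.1 ++ [n], st.2))
      ([], (L.foldl (fun d x => d.insert x ((PySem.List.count L x : Nat) : Int))
              PySem.Dict.empty).items.foldl
             (fun d (p : String × Int) =>
               if p.2 > 1 then d.insert p.1 (PySem.List.pyRange 0 p.2 1) else d)
             PySem.Dict.empty)).1
    = (L.foldl
      (fun (st : List String × PySem.Dict String Int) n =>
        if ((PySem.List.count L n : Nat) : Int) > 1 then
          (st.1 ++ [pvSfx n (st.2.getD n 0)], st.2.insert n (st.2.getD n 0 + 1))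
        else (st.1 ++ [n], st.2))
      ([], PySem.Dict.empty)).1 := by
  have hdups : ∀ n,
      (L.foldl (fun d x => d.insert x ((PySem.List.count L x : Nat) : Int))
          PySem.Dict.empty).getD n 0 > 1 ↔ ((PySem.List.count L n : Nat) : Int) > 1 := by
    intro n
    rw [pv_getD_foldl_insert_const L (fun x => ((PySem.List.count L x : Nat) : Int))]
    by_cases hn : n ∈ L
    · simp [hn]
    · simp [hn, List.count_eq_zero_of_not_mem hn, PySem.List.count, PySem.Dict.getD_empty]
  have hA : (fun (st : List String × PySem.Dict String (List Int)) n =>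
        if (L.foldl (fun d x => d.insert x ((PySem.List.count L x : Nat) : Int))
              PySem.Dict.empty).getD n 0 > 1 then
          let lst := st.2.getD n []
          (st.1 ++ [String.ofList (PySem.Chars.slice n.toList none (some 9) ++
                                   (PySem.Int.toStr (lst.headD 0)).toList)],
           st.2.insert n lst.tail)
        else (st.1 ++ [n], st.2))
      = (fun (st : List String × PySem.Dict String (List Int)) n =>
        if ((PySem.List.count L n : Nat) : Int) > 1 then
          let lst := st.2.getD n []
          (st.1 ++ [String.ofList (PySem.Chars.slice n.toList none (some 9) ++
                                   (PySem.Int.toStr (lst.headD 0)).toList)],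
           st.2.insert n lst.tail)
        else (st.1 ++ [n], st.2)) := by
    funext st n
    by_cases h : ((PySem.List.count L n : Nat) : Int) > 1
    · rw [if_pos ((hdups n).mpr h), if_pos h]
    · rw [if_neg (fun hh => h ((hdups n).mp hh)), if_neg h]
  rw [hA]
  have hgd : ∀ n ∈ L,
      (L.foldl (fun d x => d.insert x ((PySem.List.count L x : Nat) : Int))
          PySem.Dict.empty).getD n 0 = ((PySem.List.count L n : Nat) : Int) := by
    intro n hn
    rw [pv_getD_foldl_insert_const L (fun x => ((PySem.List.count L x : Nat) : Int))]
    simp [hn]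
  have hnd : (L.foldl (fun d x => d.insert x ((PySem.List.count L x : Nat) : Int))
      PySem.Dict.empty).keys.Nodup :=
    PySem.Dict.nodup_keys_foldl_insert L _ _ (by simp [PySem.Dict.keys_empty])
  have hitems : (L.foldl (fun d x => d.insert x ((PySem.List.count L x : Nat) : Int))
      PySem.Dict.empty).items
      = (PySem.Set.ofList L).map (fun k => (k, ((PySem.List.count L k : Nat) : Int))) := by
    rw [PySem.Dict.items_eq_map_keys _ hnd 0,
        PySem.Dict.keys_foldl_insert L (fun _ x => ((PySem.List.count L x : Nat) : Int)),
        PySem.Dict.keys_empty, PySem.Set.update_nil_left]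
    exact List.map_congr_left (fun k hk =>
      by rw [hgd k ((PySem.Set.mem_ofList L k).mp hk)])
  apply pv_main
  intro m hm hcm
  refine ⟨le_refl 0, ?_, ?_⟩
  · simp [PySem.Dict.getD_empty]
  · rw [hitems,
        pv_getD_suffix_fold (PySem.Set.ofList L) (PySem.Set.nodup_ofList L)
          (fun k => ((PySem.List.count L k : Nat) : Int))
          (fun v => PySem.List.pyRange 0 v 1) PySem.Dict.empty m]
    simp only [PySem.Dict.getD_empty, Int.toNat_zero, List.drop_zero]
    rw [if_pos ⟨(PySem.Set.mem_ofList L m).mpr hm, hcm⟩]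

-- the counter scan emits exactly pvSpec
theorem pv_scan_spec (cnt : String → Int) :
    ∀ (suf : List String) (pre out : List String) (seen : PySem.Dict String Int),
    (∀ m, cnt m > 1 → seen.getD m 0 = ((pre.count m : Nat) : Int)) →
    (suf.foldl
      (fun (st : List String × PySem.Dict String Int) n =>
        if cnt n > 1 then
          (st.1 ++ [pvSfx n (st.2.getD n 0)], st.2.insert n (st.2.getD n 0 + 1))
        else (st.1 ++ [n], st.2)) (out, seen)).1
      = out ++ pvSpec cnt pre suf := by
  intro suf
  induction suf with
  | nil => intro pre out seen _; simp [pvSpec]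
  | cons n suf ih =>
      intro pre out seen hinv
      simp only [List.foldl_cons, pvSpec]
      by_cases hc : cnt n > 1
      · simp only [hc, if_true]
        rw [ih (pre ++ [n]) _ _ ?_]
        · rw [hinv n hc]; simp
        · intro m hm
          rcases eq_or_ne m n with rfl | hne
          · rw [PySem.Dict.getD_insert, if_pos rfl, hinv m hm]
            simp [List.count_append]
          · rw [PySem.Dict.getD_insert, if_neg hne, hinv m hm]
            simp [List.count_append, Ne.symm hne]
      · simp only [hc, if_false]
        rw [ih (pre ++ [n]) _ _ ?_]
        · simp
        · intro m hm
          have hne : m ≠ n := fun h => hc (h ▸ hm)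
          rw [hinv m hm]
          simp [List.count_append, Ne.symm hne]

theorem pv_pvSpec_length (cnt : String → Int) :
    ∀ (suf pre : List String), (pvSpec cnt pre suf).length = suf.length := by
  intro suf
  induction suf with
  | nil => intro pre; simp [pvSpec]
  | cons n suf ih => intro pre; simp [pvSpec, ih]

theorem pv_pvSpec_getElem? (cnt : String → Int) :
    ∀ (suf pre : List String) (j : Nat),
    (pvSpec cnt pre suf)[j]?
      = (suf[j]?).map (fun n =>
          if cnt n > 1 then pvSfx n (((pre ++ suf.take j).count n : Nat) : Int) else n) := by
  intro suf
  induction suf with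
  | nil => intro pre j; simp [pvSpec]
  | cons n suf ih =>
      intro pre j
      cases j with
      | zero => simp [pvSpec]
      | succ j =>
          simp only [pvSpec, List.getElem?_cons_succ, ih (pre ++ [n]) j, List.take_succ_cons,
            List.append_assoc, List.singleton_append]

-- ---- B-side lemmas ----

theorem pv_idxsF_cons (s : Int) (m : String) (L : List String) (n : String) :
    pvIdxsF s (m :: L) n = (if m = n then [s] else []) ++ pvIdxsF (s + 1) L n := by
  simp only [pvIdxsF, PySem.List.enumerate_cons, List.map_cons, List.filter_cons, Prod.swap_prod_mk]
  by_cases h : m = n <;> simp [h]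

theorem pv_idxsF_length (n : String) :
    ∀ (L : List String) (s : Int), (pvIdxsF s L n).length = L.count n := by
  intro L
  induction L with
  | nil => intro s; simp [pvIdxsF]
  | cons m L ih =>
      intro s
      rw [pv_idxsF_cons, List.count_cons]
      by_cases h : m = n <;> simp [h, ih, beq_iff_eq]

theorem pv_idxsF_ge (n : String) :
    ∀ (L : List String) (s i : Int), i ∈ pvIdxsF s L n → s ≤ i := by
  intro L
  induction L with
  | nil => intro s i h; simp [pvIdxsF] at h
  | cons m L ih =>
      intro s i h
      rw [pv_idxsF_cons] at h
      rcases List.mem_append.mp h with h | h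
      · split at h <;> simp_all
      · have := ih (s + 1) i h; omega

theorem pv_pvPos_none (j : Int) : ∀ (l : List Int), (∀ i ∈ l, i ≠ j) → pvPos j l = none := by
  intro l
  induction l with
  | nil => intro _; rfl
  | cons i l ih =>
      intro h
      simp only [pvPos, if_neg (h i (by simp)), ih (fun x hx => h x (by simp [hx]))]
      rfl

theorem pv_pvPos_idxsF (n : String) :
    ∀ (L : List String) (s : Int) (j : Nat) (hj : j < L.length),
    pvPos (s + (j : Int)) (pvIdxsF s L n)
      = if L[j] = n then some (((L.take j).count n : Nat) : Int) else none := by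
  intro L
  induction L with
  | nil => intro s j hj; simp at hj
  | cons m L ih =>
      intro s j hj
      rw [pv_idxsF_cons]
      cases j with
      | zero =>
          by_cases h : m = n
          · simp [h, pvPos]
          · simp only [h, if_false, List.nil_append, List.getElem_cons_zero]
            rw [pv_pvPos_none _ _ (fun i hi => by have := pv_idxsF_ge n L (s+1) i hi; omega)]
      | succ j =>
          have hj' : j < L.length := by simpa using hj
          have harg : s + ((j : Int) + 1) = (s + 1) + (j : Int) := by ring
          by_cases h : m = n
          · simp only [h, if_true, List.singleton_append, pvPos,
              if_neg (by omega : ¬ s = s + ((j:Nat)+1 : Nat)), List.getElem_cons_succ]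
            push_cast
            rw [harg, ih (s + 1) j hj']
            by_cases h2 : L[j] = n
            · simp only [h2, if_true, Option.map_some]
              rw [List.take_succ_cons, List.count_cons, if_pos (by simp)]
              push_cast
              ring_nf
            · simp [h2]
          · simp only [h, if_false, List.nil_append, List.getElem_cons_succ]
            push_cast
            rw [harg, ih (s + 1) j hj']
            by_cases h2 : L[j] = n
            · simp only [h2, if_true, List.take_succ_cons, List.count_cons]
              simp [h]
            · simp [h2]

-- groups.setdefault(n, []).append(i) over enumerate(L): lookup gives the index list
theorem pv_groups_getD (L : List String) (n : String) :
    ((PySem.List.enumerate L).foldl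
      (fun d (p : Int × String) => d.modify p.2 [] (fun l => l ++ [p.1]))
      (PySem.Dict.empty : PySem.Dict String (List Int))).getD n []
    = pvIdxsF 0 L n := by
  have h : (PySem.List.enumerate L).foldl
      (fun d (p : Int × String) => d.modify p.2 [] (fun l => l ++ [p.1]))
      (PySem.Dict.empty : PySem.Dict String (List Int))
      = ((PySem.List.enumerate L).map Prod.swap).foldl
          (fun d (p : String × Int) => d.modify p.1 [] (fun l => l ++ [p.2]))
          PySem.Dict.empty := by
    rw [List.foldl_map]
    simp only [Prod.fst_swap, Prod.snd_swap]
  rw [h, PySem.Dict.getD_foldl_modify_append, PySem.Dict.getD_empty]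
  rfl

theorem pv_groups_items (L : List String) :
    ((PySem.List.enumerate L).foldl
      (fun d (p : Int × String) => d.modify p.2 [] (fun l => l ++ [p.1]))
      (PySem.Dict.empty : PySem.Dict String (List Int))).items
    = (PySem.Set.ofList L).map (fun n => (n, pvIdxsF 0 L n)) := by
  have hkeys : ((PySem.List.enumerate L).foldl
      (fun d (p : Int × String) => d.modify p.2 [] (fun l => l ++ [p.1]))
      (PySem.Dict.empty : PySem.Dict String (List Int))).keys = PySem.Set.ofList L := by
    rw [PySem.Dict.keys_foldl_modify_key (PySem.List.enumerate L) (fun p => p.2) [] _ PySem.Dict.empty,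
        PySem.Dict.keys_empty, PySem.Set.update_nil_left, PySem.List.map_snd_enumerate]
  have hnd : ((PySem.List.enumerate L).foldl
      (fun d (p : Int × String) => d.modify p.2 [] (fun l => l ++ [p.1]))
      (PySem.Dict.empty : PySem.Dict String (List Int))).keys.Nodup := by
    rw [hkeys]; exact PySem.Set.nodup_ofList L
  rw [PySem.Dict.items_eq_map_keys _ hnd [], hkeys]
  exact List.map_congr_left (fun k _ => by rw [pv_groups_getD])

-- one group's inner write loop, observed at position j
theorem pv_idxsF_nodup (n : String) :
    ∀ (L : List String) (s : Int), (pvIdxsF s L n).Nodup := by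
  intro L
  induction L with
  | nil => intro s; simp [pvIdxsF]
  | cons m L ih =>
      intro s
      rw [pv_idxsF_cons]
      by_cases h : m = n
      · simp only [h, if_true, List.singleton_append, List.nodup_cons]
        exact ⟨fun hs => by have := pv_idxsF_ge n L (s+1) s hs; omega, ih (s+1)⟩
      · simpa [h] using ih (s+1)

theorem pv_apply_get (n : String) :
    ∀ (idxs : List Int) (s : Int) (out : List String) (j : Nat),
    idxs.Nodup → (∀ i ∈ idxs, 0 ≤ i) →
    ((PySem.List.enumerate idxs s).foldl
      (fun out (q : Int × Int) => PySem.List.pySetD out q.2 (pvSfx n q.1)) out)[j]?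
    = match pvPos (j : Int) idxs with
      | some k => out[j]?.map (fun _ => pvSfx n (s + k))
      | none => out[j]? := by
  intro idxs
  induction idxs with
  | nil => intro s out j _ _; rfl
  | cons i idxs ih =>
      intro s out j hnd hpos
      have hi : 0 ≤ i := hpos i (by simp)
      have hnd' := List.nodup_cons.mp hnd
      simp only [PySem.List.enumerate_cons, List.foldl_cons]
      rw [ih (s + 1) _ j hnd'.2 (fun x hx => hpos x (by simp [hx]))]
      rw [PySem.List.pySetD_of_nonneg (h := hi)]
      by_cases hji : (j : Int) = i
      · have hjn : j = i.toNat := by omega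
        have hPnone : pvPos (j : Int) idxs = none :=
          pv_pvPos_none _ _ (fun x hx he => hnd'.1 (by rw [he, hji] at hx; exact hx))
        simp only [pvPos, if_pos hji.symm, hPnone]
        subst hjn
        simp only [List.getElem?_set_self', add_zero]
        cases out[i.toNat]? <;> rfl
      · have hne : i.toNat ≠ j := by omega
        have hij : ¬ i = (j : Int) := fun h => hji h.symm
        simp only [pvPos]
        rw [List.getElem?_set_ne hne]
        cases hP : pvPos (j : Int) idxs with
        | none => simp [hij]
        | some k =>
            have hsk : s + 1 + k = s + (k + 1) := by ring
            simp [hij, hsk]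

theorem pv_apply_length (n : String) :
    ∀ (idxs : List Int) (s : Int) (out : List String),
    ((PySem.List.enumerate idxs s).foldl
      (fun out (q : Int × Int) => PySem.List.pySetD out q.2 (pvSfx n q.1)) out).length
    = out.length := by
  intro idxs
  induction idxs with
  | nil => intro s out; rfl
  | cons i idxs ih =>
      intro s out
      simp only [PySem.List.enumerate_cons, List.foldl_cons, ih, PySem.List.length_pySetD]

-- the per-group outer loop, observed at position j < L.length
theorem pv_outer (L : List String) (j : Nat) (hj : j < L.length) :
    ∀ (ns : List String) (out : List String), out.length = L.length →
    (ns.foldl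
      (fun (out : List String) (n : String) =>
        if (((pvIdxsF 0 L n).length : Nat) : Int) > 1 then
          (PySem.List.enumerate (pvIdxsF 0 L n)).foldl
            (fun out (q : Int × Int) => PySem.List.pySetD out q.2 (pvSfx n q.1)) out
        else out) out)[j]?
    = if L[j] ∈ ns ∧ 1 < L.count L[j]
      then some (pvSfx L[j] (((L.take j).count L[j] : Nat) : Int))
      else out[j]? := by
  intro ns
  induction ns with
  | nil => intro out hlen; simp
  | cons n ns ih =>
      intro out hlen
      simp only [List.foldl_cons]
      have hstep_len : ∀ (o : List String),
          (if (((pvIdxsF 0 L n).length : Nat) : Int) > 1 then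
            (PySem.List.enumerate (pvIdxsF 0 L n)).foldl
              (fun out (q : Int × Int) => PySem.List.pySetD out q.2 (pvSfx n q.1)) o
          else o).length = o.length := by
        intro o; split
        · exact pv_apply_length n _ 0 o
        · rfl
      rw [ih _ (by rw [hstep_len, hlen])]
      have hstep_get :
          (if (((pvIdxsF 0 L n).length : Nat) : Int) > 1 then
            (PySem.List.enumerate (pvIdxsF 0 L n)).foldl
              (fun out (q : Int × Int) => PySem.List.pySetD out q.2 (pvSfx n q.1)) out
          else out)[j]?
          = if L[j] = n ∧ 1 < L.count n
            then some (pvSfx n (((L.take j).count n : Nat) : Int))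
            else out[j]? := by
        have hcnt : (((pvIdxsF 0 L n).length : Nat) : Int) > 1 ↔ 1 < L.count n := by
          rw [pv_idxsF_length]
          exact_mod_cast Iff.rfl
        by_cases hgt : 1 < L.count n
        · rw [if_pos (hcnt.mpr hgt)]
          rw [pv_apply_get n _ 0 out j (pv_idxsF_nodup n L 0) (fun i hi => pv_idxsF_ge n L 0 i hi)]
          have := pv_pvPos_idxsF n L 0 j hj
          rw [zero_add] at this
          rw [this]
          by_cases hLj : L[j] = n
          · rw [if_pos hLj]
            have hout : out[j]? = some (out[j]'(by omega)) := List.getElem?_eq_getElem (by omega)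
            simp [hout, hLj, hgt]
          · simp [hLj, hgt]
        · rw [if_neg (fun h => hgt (hcnt.mp h))]
          simp [hgt]
      rw [hstep_get]
      by_cases h1 : L[j] ∈ ns ∧ 1 < L.count L[j]
      · rw [if_pos h1, if_pos ⟨List.mem_cons_of_mem n h1.1, h1.2⟩]
      · rw [if_neg h1]
        by_cases h2 : L[j] = n ∧ 1 < L.count n
        · rw [if_pos h2, if_pos ⟨by simp [h2.1], h2.1 ▸ h2.2⟩, h2.1]
        · rw [if_neg h2, if_neg ?_]
          intro ⟨hm, hc⟩
          rcases List.mem_cons.mp hm with h | h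
          · exact h2 ⟨h, h ▸ hc⟩
          · exact h1 ⟨h, hc⟩

theorem pv_outer_length (L : List String) :
    ∀ (ns : List String) (out : List String),
    (ns.foldl
      (fun (out : List String) (n : String) =>
        if (((pvIdxsF 0 L n).length : Nat) : Int) > 1 then
          (PySem.List.enumerate (pvIdxsF 0 L n)).foldl
            (fun out (q : Int × Int) => PySem.List.pySetD out q.2 (pvSfx n q.1)) out
        else out) out).length = out.length := by
  intro ns
  induction ns with
  | nil => intro out; rfl
  | cons n ns ih =>
      intro out
      simp only [List.foldl_cons, ih]
      split
      · exact pv_apply_length n _ 0 out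
      · rfl

-- B's whole body on the truncated list L, pointwise
theorem pv_B_eq (L : List String) :
    (((PySem.List.enumerate L).foldl
        (fun d (p : Int × String) => d.modify p.2 [] (fun l => l ++ [p.1]))
        (PySem.Dict.empty : PySem.Dict String (List Int))).items.foldl
      (fun (out : List String) (g : String × List Int) =>
        if ((g.2.length : Nat) : Int) > 1 then
          (PySem.List.enumerate g.2).foldl
            (fun out (q : Int × Int) => PySem.List.pySetD out q.2 (pvSfx g.1 q.1)) out
        else out) L)
    = pvSpec (fun n => ((L.count n : Nat) : Int)) [] L := by
  rw [pv_groups_items, List.foldl_map]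
  apply List.ext_getElem?
  intro j
  by_cases hj : j < L.length
  · rw [pv_outer L j hj (PySem.Set.ofList L) L rfl,
        pv_pvSpec_getElem? (fun n => ((L.count n : Nat) : Int)) L [] j]
    have hmem : L[j] ∈ PySem.Set.ofList L :=
      (PySem.Set.mem_ofList L L[j]).mpr (List.getElem_mem hj)
    have hLj : L[j]? = some (L[j]'hj) := List.getElem?_eq_getElem hj
    rw [hLj]
    simp only [Option.map_some, List.nil_append]
    by_cases hc : 1 < L.count L[j]
    · rw [if_pos ⟨hmem, hc⟩, if_pos (by exact_mod_cast hc)]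
    · rw [if_neg (fun h => hc h.2), if_neg (by exact_mod_cast hc)]
  · have h1 : (pvSpec (fun n => ((L.count n : Nat) : Int)) [] L).length ≤ j := by
      rw [pv_pvSpec_length]; omega
    have h2 : ((PySem.Set.ofList L).foldl
        (fun (out : List String) (n : String) =>
          if (((pvIdxsF 0 L n).length : Nat) : Int) > 1 then
            (PySem.List.enumerate (pvIdxsF 0 L n)).foldl
              (fun out (q : Int × Int) => PySem.List.pySetD out q.2 (pvSfx n q.1)) out
          else out) L).length ≤ j := by
      rw [pv_outer_length]; omega
    rw [List.getElem?_eq_none h1, List.getElem?_eq_none h2]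

-- ===== VERDICT (by name: the statement is the Claim_ definition above) =====
theorem enforce_10ch_limit_spec : Claim_equal_enforce_10ch_limit := by
  intro names _
  show enforce_10ch_limit names = enforce_10ch_limit_alt names
  unfold enforce_10ch_limit enforce_10ch_limit_alt
  set L := names.map (fun n =>
    if PySem.Str.len n > 10 then
      String.ofList (PySem.Chars.slice n.toList none (some 5) ++
                     PySem.Chars.slice n.toList (some (-4)) none ++ ['_'])
    else n) with hL
  have hA := pv_A_eq_scan L
  have hscan := pv_scan_spec (fun n => ((PySem.List.count L n : Nat) : Int)) L [] [] PySem.Dict.empty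
    (by intro m _; simp [PySem.Dict.getD_empty])
  have hB := pv_B_eq L
  simp only [pvSfx] at hA hscan hB
  rw [hA, hscan, List.nil_append]
  rw [hB]
  rfl
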